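-- pv_equiv track=rewrite | github.com/mara-alves/LEIC-A-IST | FP/Proj1/Proj1.py | eh_labirinto
-- ===== SOURCE A (Python) =====
-- def eh_labirinto (maze):
--
--     if not isinstance (maze, tuple): #verifica se e tuplo
--         return False
--     elif len(maze) < 3: #verifica minimo de 3 nas abcissas
--         return False
--
--     #subtuplos
--     else:
--         for t in range(len(maze)):
--             if not isinstance (maze[t], tuple): #dentro do tuplo principal so ha tuplos
--                 return False
--             elif len(maze[t]) != len(maze[t-1]): #todos os tuplos tem o mesmo comprimento
--                 return False
--             elif len(maze[t]) < 3: #verifica se cumpre o minimo 3 nas ordenadas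
--                 return False
--
--             #elementos dos subtuplos
--             else:
--                 for e in range(len(maze[t])):
--                     if type (maze[t][e]) != int: #corrige o problema de aceitar true e false como elementos
--                         return False
--                     elif maze[t][e] != 0 and maze[t][e] != 1: #elementos dos tuplos so podem ser 0 ou 1
--                         return False
--                     elif t == 0 and maze[t][e] != 1: #primeiro tuplo so paredes
--                         return False
--                     elif t == len(maze)-1 and maze[t][e] != 1: #ultimo tuplo so paredes
--                         return False
--                     elif (e == 0 and maze[t][e] != 1) or (e == len(maze[t])-1 and maze[t][e] != 1): #primeiro e ultimo elementos dos tuplos sao 1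
--                         return False
--     return True
-- ===== SOURCE B (Python) =====
-- def eh_labirinto(maze):
--     # pass 0: outer shape
--     if not isinstance(maze, tuple) or len(maze) < 3:
--         return False
--     if not isinstance(maze[0], tuple):
--         return False
--     width = len(maze[0])
--     if width < 3:
--         return False
--     # pass 1: every row is a tuple of the same width
--     if any(not isinstance(row, tuple) or len(row) != width for row in maze):
--         return False
--     # pass 2: every cell is a genuine int equal to 0 or 1
--     if any(type(x) is not int or (x != 0 and x != 1) for row in maze for x in row):
--         return False
--     # pass 3: perimeter is all walls
--     if any(x != 1 for x in maze[0]) or any(x != 1 for x in maze[-1]):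
--         return False
--     if any(row[0] != 1 or row[-1] != 1 for row in maze):
--         return False
--     return True
-- ===== Notes on version B (the rewrite author's own statement) =====
-- stated objective: alternative
-- what changed: A's single index loop that interleaves a cyclic previous-row length comparison (maze[t] vs maze[t-1], wrapping to the last row at t=0) with per-cell and border checks is replaced by independent whole-structure passes: shape against width=len(maze[0]), then cell values in {0,1}, then a perimeter-only pass over first/last row and first/last column.
import Mathlib
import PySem

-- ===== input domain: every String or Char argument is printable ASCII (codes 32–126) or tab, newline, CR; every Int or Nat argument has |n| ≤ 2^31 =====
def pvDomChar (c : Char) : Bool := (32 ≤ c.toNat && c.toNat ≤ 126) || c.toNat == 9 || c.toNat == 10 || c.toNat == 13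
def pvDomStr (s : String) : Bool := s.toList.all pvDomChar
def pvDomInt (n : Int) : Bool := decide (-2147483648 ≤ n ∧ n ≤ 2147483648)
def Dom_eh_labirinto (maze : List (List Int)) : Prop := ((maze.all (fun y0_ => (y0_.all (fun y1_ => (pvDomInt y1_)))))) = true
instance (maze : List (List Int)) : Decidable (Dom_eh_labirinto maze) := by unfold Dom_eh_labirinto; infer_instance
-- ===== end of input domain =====

-- B replaces A's single interleaved index loop (with its cyclic previous-row length comparison)
-- by separate whole-structure passes: shape, cell values, perimeter rows/columns. Objective: alternative decomposition.
-- On List (List Int) the Python isinstance/type checks of both programs are always true and are dropped.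

-- ===== PORT A =====
def eh_labirinto (maze : List (List Int)) : Bool :=
  if maze.length < 3 then false
  else
    (List.range maze.length).all (fun t =>
      let row := PySem.List.pyGetD maze (t : Int) []
      let prev := PySem.List.pyGetD maze ((t : Int) - 1) []
      if row.length ≠ prev.length then false
      else if row.length < 3 then false
      else
        (List.range row.length).all (fun e =>
          let x := PySem.List.pyGetD row (e : Int) 0
          if x ≠ 0 ∧ x ≠ 1 then false
          else if t = 0 ∧ x ≠ 1 then false
          else if t = maze.length - 1 ∧ x ≠ 1 then false
          else if (e = 0 ∧ x ≠ 1) ∨ (e = row.length - 1 ∧ x ≠ 1) then false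
          else true))

-- ===== PORT B =====
def eh_labirinto_alt (maze : List (List Int)) : Bool :=
  if maze.length < 3 then false
  else
    let first := PySem.List.pyGetD maze 0 []
    let width := first.length
    if width < 3 then false
    else if maze.any (fun row => row.length ≠ width) then false
    else if maze.any (fun row => row.any (fun x => x ≠ 0 ∧ x ≠ 1)) then false
    else if first.any (fun x => x ≠ 1) || (PySem.List.pyGetD maze (-1) []).any (fun x => x ≠ 1) then false
    else if maze.any (fun row => PySem.List.pyGetD row 0 0 ≠ 1 ∨ PySem.List.pyGetD row (-1) 0 ≠ 1) then false
    else true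

-- ===== PRECONDITION & SPEC =====
def Spec_eh_labirinto (maze : List (List Int)) (out : Bool) : Prop := out = eh_labirinto_alt maze
instance (maze : List (List Int)) (out : Bool) : Decidable (Spec_eh_labirinto maze out) := by unfold Spec_eh_labirinto; infer_instance

-- ===== CLAIM (what is proved, stated in full; the proofs are below) =====
def Claim_equal_eh_labirinto : Prop := ∀ (maze : List (List Int)), Dom_eh_labirinto maze → Spec_eh_labirinto maze (eh_labirinto maze)

-- ===== LEMMAS AND PROOFS =====

lemma ite_false_true_iff {c : Prop} [Decidable c] {b : Bool} :
    ((if c then false else b) = true) ↔ ¬c ∧ b = true := by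
  split_ifs with h <;> simp [h]

lemma pyGetD_neg_one_getD {α : Type} (r : List α) (d : α) :
    PySem.List.pyGetD r (-1) d = r.getD (r.length - 1) d := by
  cases r with
  | nil => simp [PySem.List.pyGetD, PySem.List.pyGet?, PySem.List.pyIdx?]
  | cons a l =>
    rw [PySem.List.pyGetD_neg_one _ _ (by simp), List.getLast_eq_getElem,
      List.getD_eq_getElem _ _ (by simp)]
    rfl

lemma forall_mem_iff_getD {α : Type} (l : List α) (d : α) (P : α → Prop) :
    (∀ x ∈ l, P x) ↔ ∀ i, i < l.length → P (l.getD i d) := by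
  constructor
  · intro h i hi; rw [List.getD_eq_getElem _ _ hi]; exact h _ (List.getElem_mem hi)
  · intro h x hx
    obtain ⟨i, hi, rfl⟩ := List.mem_iff_getElem.mp hx
    have := h i hi; rwa [List.getD_eq_getElem _ _ hi] at this

lemma eh_labirinto_eq_alt (maze : List (List Int)) : eh_labirinto maze = eh_labirinto_alt maze := by
  by_cases h3 : maze.length < 3
  · simp [eh_labirinto, eh_labirinto_alt, h3]
  · have hne : maze ≠ [] := by intro h; subst h; simp at h3
    have hlast : maze.getLast hne = maze.getD (maze.length - 1) [] := by
      rw [List.getLast_eq_getElem, List.getD_eq_getElem _ _ (by omega)]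
    rw [Bool.eq_iff_iff]
    simp only [eh_labirinto, eh_labirinto_alt, if_neg h3, List.all_eq_true, List.mem_range,
      List.any_eq_true, Bool.or_eq_true, decide_eq_true_eq, ite_false_true_iff,
      pyGetD_neg_one_getD, PySem.List.pyGetD_neg_one _ _ hne, PySem.List.pyGetD_zero,
      PySem.List.pyGetD_natCast, and_true]
    push Not
    constructor
    · intro hall
      have rect : ∀ t, t < maze.length → (maze.getD t []).length = (maze.getD 0 []).length := by
        intro t
        induction t with
        | zero => intro _; rfl
        | succ k ih =>
          intro hk
          have hA := (hall (k+1) hk).1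
          rw [show ((k+1:Nat):Int) - 1 = ((k:Nat):Int) by push_cast; ring,
            PySem.List.pyGetD_natCast] at hA
          exact hA.trans (ih (by omega))
      have h0 : 0 < maze.length := by omega
      have hw3 : 3 ≤ (maze.getD 0 []).length := (hall 0 h0).2.1
      refine ⟨hw3, ?_, ?_, ⟨?_, ?_⟩, ?_⟩
      · rw [forall_mem_iff_getD _ []]; exact rect
      · rw [forall_mem_iff_getD _ []]
        intro t ht
        rw [forall_mem_iff_getD _ 0]
        intro e he
        exact ((hall t ht).2.2 e he).1
      · rw [forall_mem_iff_getD _ 0]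
        intro e he
        exact ((hall 0 h0).2.2 e he).2.1 rfl
      · rw [hlast, forall_mem_iff_getD _ 0]
        intro e he
        exact ((hall (maze.length - 1) (by omega)).2.2 e he).2.2.1 rfl
      · rw [forall_mem_iff_getD _ []]
        intro t ht
        have h := (hall t ht).2.2
        have hl3 := (hall t ht).2.1
        exact ⟨(h 0 (by omega)).2.2.2.1 rfl, (h ((maze.getD t []).length - 1) (by omega)).2.2.2.2 rfl⟩
    · rintro ⟨hw3, hrect, hcells, ⟨hrow0, hrowl⟩, hcols⟩
      rw [forall_mem_iff_getD _ []] at hrect hcells hcols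
      rw [forall_mem_iff_getD _ 0] at hrow0
      rw [hlast, forall_mem_iff_getD _ 0] at hrowl
      intro t ht
      have hLt := hrect t ht
      refine ⟨?_, by omega, ?_⟩
      · cases t with
        | zero =>
          rw [show ((0:Nat):Int) - 1 = (-1 : Int) by norm_num, pyGetD_neg_one_getD]
          rw [hLt, hrect (maze.length - 1) (by omega)]
        | succ k =>
          rw [show ((k+1:Nat):Int) - 1 = ((k:Nat):Int) by push_cast; ring,
            PySem.List.pyGetD_natCast]
          rw [hLt, hrect k (by omega)]
      · intro e he
        have hcellsT := hcells t ht
        rw [forall_mem_iff_getD _ 0] at hcellsT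
        refine ⟨hcellsT e he, ?_, ?_, ?_, ?_⟩
        · rintro rfl; exact hrow0 e (by omega)
        · rintro rfl; exact hrowl e (by omega)
        · rintro rfl; exact (hcols t ht).1
        · rintro rfl; exact (hcols t ht).2

-- ===== VERDICT (by name: the statement is the Claim_ definition above) =====
theorem eh_labirinto_spec : Claim_equal_eh_labirinto := by
  intro maze _
  exact eh_labirinto_eq_alt maze
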